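-- pv_equiv track=rewrite | github.com/mions1/ParolaDelGiorno | alexa/test.py | delete_more_digit
-- ===== SOURCE A (Python) =====
-- def delete_more_digit(txt):
--     """ Elimina i numeri quando ce ne sono di più consecutivi
--     es. "142 ciao 1 co232me" -> " ciao 1 come"
--
--     Parameters:
--         txt (str): testo su cui lavorare
--
--     Return:
--         testo modificato
--     """
--
--     last_digit = None   # salvo l'ultimo numero incontrato, nel caso in cui devo salvarlo poiché non è seguito o preceduto da altre cifre
--     i = 0   # se è 0 vuol dire che non ho ancora incontrato un numero
--             # se è 1 vuol dire che ne ho incontrato solo 1, quindi và tenuto (salvato in last_digit)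
--             # se è > 1 vuol dire che ne ho incontrati di più, quindi non li salvo
--     new_txt = ""
--
--     #Per ogni carattere nel testo controllo se sia un numero
--     # se è un numero, lo salvo in last_digit ed incremento i
--     # se non è un numero, controllo se i > 0
--     #   se è 1 allora vuol dire che prima ho incontrato un numero solo quindi lo salvo (da last_digit)
--     #   se è > 1 allora vuol dire che i numeri incontrati prima non vanno salvati
--     #   in ogni caso, continuo poi a salvare i nuovi caratteri fino al prossimo numero
--     for c in txt:
--         if c.isdigit():
--             i += 1
--             last_digit = c
--         else:
--             if i == 1:
--                 new_txt += last_digit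
--             new_txt += c
--             i = 0
--
--     return new_txt
-- ===== SOURCE B (Python) =====
-- def delete_more_digit(txt):
--     """Drop every run of >=2 consecutive digits and any trailing digit;
--     keep isolated single digits that are followed by a non-digit.
--     One pass with a lookahead instead of A's held-back last_digit counter."""
--     out = []
--     prev_digit = False
--     nexts = list(txt[1:]) + [None]
--     for c, nx in zip(txt, nexts):
--         d = c.isdigit()
--         if not d or (not prev_digit and nx is not None and not nx.isdigit()):
--             out.append(c)
--         prev_digit = d
--     return "".join(out)
-- ===== Notes on version B (the rewrite author's own statement) =====
-- stated objective: alternative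
-- what changed: Replaced A's held-back last_digit + run-counter state machine (which emits a kept digit one step late) with a single pass that pairs each character with its successor and decides immediately per character via a lookahead plus a previous-was-digit flag, collecting into a list joined once.
import Mathlib
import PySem

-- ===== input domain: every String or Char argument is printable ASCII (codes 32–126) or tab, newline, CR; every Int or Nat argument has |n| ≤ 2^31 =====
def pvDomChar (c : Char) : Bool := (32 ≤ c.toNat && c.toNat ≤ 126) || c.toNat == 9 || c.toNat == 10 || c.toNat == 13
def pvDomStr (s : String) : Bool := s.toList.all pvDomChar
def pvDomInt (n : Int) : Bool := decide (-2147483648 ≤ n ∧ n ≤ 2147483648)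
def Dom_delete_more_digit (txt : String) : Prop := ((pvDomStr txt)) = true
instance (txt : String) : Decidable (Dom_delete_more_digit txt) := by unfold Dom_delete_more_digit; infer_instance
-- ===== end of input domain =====

-- B replaces A's held-back last_digit/run-counter state machine with a one-pass
-- lookahead over (char, successor) pairs; same cost, plainer decision rule (objective: alternative).

-- ===== PORT A =====
-- state: last_digit (Option Char, None at start), i (run counter), new_txt accumulator
def pvALoop : List Char → Option Char → Nat → List Char → List Char
  | [], _, _, newTxt => newTxt
  | c :: rest, last, i, newTxt =>
    if PySem.Chars.isdigit c then
      pvALoop rest (some c) (i + 1) newTxt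
    else
      pvALoop rest last 0 ((if i = 1 then newTxt ++ last.toList else newTxt) ++ [c])

def delete_more_digit (txt : String) : String :=
  String.ofList (pvALoop txt.toList none 0 [])

-- ===== PORT B =====
-- fold over zip(txt, nexts) with prev_digit flag; nx = None ported as Option Char
def pvBLoop : List (Char × Option Char) → List Char → Bool → List Char
  | [], out, _ => out
  | (c, nx) :: rest, out, prevD =>
    let d := PySem.Chars.isdigit c
    pvBLoop rest
      (if !d || (!prevD && (match nx with
                            | some h => !PySem.Chars.isdigit h
                            | none => false)) then out ++ [c] else out)
      d

def delete_more_digit_alt (txt : String) : String :=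
  let cs := txt.toList
  let nexts := (cs.drop 1).map some ++ [none]
  String.ofList (pvBLoop (cs.zip nexts) [] false)

-- ===== PRECONDITION & SPEC =====
def Spec_delete_more_digit (txt : String) (out : String) : Prop := out = delete_more_digit_alt txt
instance (txt : String) (out : String) : Decidable (Spec_delete_more_digit txt out) := by unfold Spec_delete_more_digit; infer_instance

-- ===== CLAIM (what is proved, stated in full; the proofs are below) =====
def Claim_equal_delete_more_digit : Prop := ∀ (txt : String), Dom_delete_more_digit txt → Spec_delete_more_digit txt (delete_more_digit txt)

-- ===== LEMMAS AND PROOFS =====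

-- the (char, successor) pair list B folds over
def pvPairs (cs : List Char) : List (Char × Option Char) :=
  cs.zip ((cs.drop 1).map some ++ [none])

lemma pvPairs_cons (c : Char) (rs : List Char) :
    pvPairs (c :: rs) = (c, rs.head?) :: pvPairs rs := by
  cases rs <;> simp [pvPairs]

-- the digit A still holds back after a prefix whose trailing digit-run has length i:
-- it will be emitted iff i = 1 and the next character exists and is not a digit
def pvPend (rest : List Char) (i : Nat) (last : Option Char) : List Char :=
  if i = 1 then
    (match rest.head? with
     | some h => if PySem.Chars.isdigit h then [] else last.toList
     | none => [])
  else []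

lemma pvLoop_eq : ∀ (rest : List Char) (last : Option Char) (i : Nat) (out : List Char),
    pvALoop rest last i out
      = pvBLoop (pvPairs rest) (out ++ pvPend rest i last) (decide (i ≠ 0)) := by
  intro rest
  induction rest with
  | nil => intro last i out; simp [pvALoop, pvPairs, pvBLoop, pvPend]
  | cons c rs ih =>
    intro last i out
    rw [pvPairs_cons]
    by_cases hd : PySem.Chars.isdigit c
    · simp only [pvALoop, hd, if_pos, pvBLoop]
      rw [ih]
      have hflag : decide (i + 1 ≠ 0) = true := by simp
      rw [hflag]
      congr 1
      by_cases hi : i = 0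
      · subst hi
        cases rs with
        | nil => simp [pvPend]
        | cons r rs' =>
          by_cases hh : PySem.Chars.isdigit r <;> simp [pvPend, hh]
      · have h2 : i + 1 ≠ 1 := by omega
        cases rs with
        | nil => simp [pvPend, hd, hi]
        | cons r rs' => simp [pvPend, hd, hi]
    · simp only [Bool.not_eq_true] at hd
      simp only [pvALoop, hd, Bool.false_eq_true, if_false, pvBLoop]
      rw [ih]
      simp only [Bool.not_false, Bool.true_or, if_pos, decide_not]
      congr 1
      by_cases h1 : i = 1 <;> simp [pvPend, hd, h1]

-- ===== VERDICT (by name: the statement is the Claim_ definition above) =====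
theorem delete_more_digit_spec : Claim_equal_delete_more_digit := by
  intro txt _
  show delete_more_digit txt = delete_more_digit_alt txt
  unfold delete_more_digit delete_more_digit_alt
  rw [pvLoop_eq]
  simp [pvPend, pvPairs]
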